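-- pv_equiv track=rewrite | github.com/CSCI-1101-TTh12-F22/samplecode | week6/guessthecode.py | guess_the_code
-- ===== SOURCE A (Python) =====
-- def guess_the_code(the_code):
--
--     # start off with empty guess and 0 guesses
--     guesscode = ""
--     guesses = 0
--
--     # nested for loops!
--     # go through each possibility for the first letter,
--     # the second, the third letter...
--     for i in "ABCD":
--         for j in "ABCD":
--             for k in "ABCD":
--                 guesses += 1
--
--                 # make a guess
--                 guesscode = i + j + k
--
--                 # if you guess right, return the number of guesses!
--                 if guesscode == the_code:
--                     return (guesses)
--
--     # if you got all the way through without guessing correctly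
--     # return an error code, -1
--     return -1
-- ===== SOURCE B (Python) =====
-- def guess_the_code(the_code):
--     # closed-form positional formula instead of enumerating the 64 combinations
--     if not isinstance(the_code, str) or len(the_code) != 3:
--         return -1
--     alphabet = "ABCD"
--     if any(ch not in alphabet for ch in the_code):
--         return -1
--     a, b, c = (alphabet.index(ch) for ch in the_code)
--     return 16 * a + 4 * b + c + 1
-- ===== Notes on version B (the rewrite author's own statement) =====
-- stated objective: simpler
-- what changed: Replaced the triple nested loop over all 64 ABCD combinations with validation plus a closed-form base-4 positional formula 16*a+4*b+c+1.
import Mathlib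
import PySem

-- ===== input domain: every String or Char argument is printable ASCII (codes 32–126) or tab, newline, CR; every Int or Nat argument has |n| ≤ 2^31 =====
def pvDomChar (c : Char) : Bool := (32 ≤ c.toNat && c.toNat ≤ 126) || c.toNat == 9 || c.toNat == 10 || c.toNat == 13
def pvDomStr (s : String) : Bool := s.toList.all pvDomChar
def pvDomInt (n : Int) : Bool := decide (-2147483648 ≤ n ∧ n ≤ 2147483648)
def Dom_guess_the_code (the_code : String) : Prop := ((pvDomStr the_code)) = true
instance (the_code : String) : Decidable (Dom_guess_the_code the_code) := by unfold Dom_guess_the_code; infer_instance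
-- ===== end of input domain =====

-- B replaces A's triple nested loop over all 64 combinations by validation plus
-- the closed-form positional formula 16*a + 4*b + c + 1 (objective: simpler).

-- ===== PORT A =====
-- the letters of the Python string literal "ABCD" the loops iterate over
def gtcAlphabet : List Char := ['A', 'B', 'C', 'D']

-- innermost loop: for k in "ABCD"; threads the guess counter, early-returns some
def gtcLoopK (i j : Char) (the_code : String) (guesses : Int) :
    List Char → Option Int × Int
  | [] => (none, guesses)
  | k :: ks =>
    let guesses := guesses + 1
    if String.ofList [i, j, k] = the_code then (some guesses, guesses)
    else gtcLoopK i j the_code guesses ks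

-- middle loop: for j in "ABCD"
def gtcLoopJ (i : Char) (the_code : String) (guesses : Int) :
    List Char → Option Int × Int
  | [] => (none, guesses)
  | j :: js =>
    match gtcLoopK i j the_code guesses gtcAlphabet with
    | (some r, g) => (some r, g)
    | (none, g) => gtcLoopJ i the_code g js

-- outer loop: for i in "ABCD"
def gtcLoopI (the_code : String) (guesses : Int) :
    List Char → Option Int × Int
  | [] => (none, guesses)
  | i :: is =>
    match gtcLoopJ i the_code guesses gtcAlphabet with
    | (some r, g) => (some r, g)
    | (none, g) => gtcLoopI the_code g is

def guess_the_code (the_code : String) : Int :=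
  match gtcLoopI the_code 0 gtcAlphabet with
  | (some r, _) => r
  | (none, _) => -1

-- ===== PORT B =====
-- "ABCD".index(ch) (after the membership check it always succeeds)
def gtcIdx (c : Char) : Option Int :=
  (PySem.List.index? ['A', 'B', 'C', 'D'] c).map Int.ofNat

def guess_the_code_alt (the_code : String) : Int :=
  match the_code.toList with
  | [a, b, c] =>
    match gtcIdx a, gtcIdx b, gtcIdx c with
    | some x, some y, some z => 16 * x + 4 * y + z + 1
    | _, _, _ => -1
  | _ => -1

-- ===== PRECONDITION & SPEC =====
def Spec_guess_the_code (the_code : String) (out : Int) : Prop := out = guess_the_code_alt the_code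
instance (the_code : String) (out : Int) : Decidable (Spec_guess_the_code the_code out) := by unfold Spec_guess_the_code; infer_instance

-- ===== CLAIM (what is proved, stated in full; the proofs are below) =====
def Claim_equal_guess_the_code : Prop := ∀ (the_code : String), Dom_guess_the_code the_code → Spec_guess_the_code the_code (guess_the_code the_code)

-- ===== LEMMAS AND PROOFS =====

lemma gtcLoopK_none (i j : Char) (tc : String) (g : Int) (ks : List Char)
    (h : ∀ k ∈ ks, String.ofList [i, j, k] ≠ tc) :
    gtcLoopK i j tc g ks = (none, g + ks.length) := by
  induction ks generalizing g with
  | nil => simp [gtcLoopK]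
  | cons k ks ih =>
    simp only [gtcLoopK]
    rw [if_neg (h k (by simp))]
    rw [ih (g + 1) (fun k hk => h k (by simp [hk]))]
    simp; ring

lemma gtcLoopJ_none (i : Char) (tc : String) (g : Int) (js : List Char)
    (h : ∀ j ∈ js, ∀ k ∈ gtcAlphabet, String.ofList [i, j, k] ≠ tc) :
    gtcLoopJ i tc g js = (none, g + 4 * js.length) := by
  induction js generalizing g with
  | nil => simp [gtcLoopJ]
  | cons j js ih =>
    have hk := gtcLoopK_none i j tc g gtcAlphabet (h j (by simp))
    simp only [gtcLoopJ, hk]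
    rw [ih _ (fun j' hj => h j' (by simp [hj]))]
    simp [gtcAlphabet]; ring

lemma gtcLoopI_none (tc : String) (g : Int) (is : List Char)
    (h : ∀ i ∈ is, ∀ j ∈ gtcAlphabet, ∀ k ∈ gtcAlphabet, String.ofList [i, j, k] ≠ tc) :
    gtcLoopI tc g is = (none, g + 16 * is.length) := by
  induction is generalizing g with
  | nil => simp [gtcLoopI]
  | cons i is ih =>
    have hj := gtcLoopJ_none i tc g gtcAlphabet (h i (by simp))
    simp only [gtcLoopI, hj]
    rw [ih _ (fun i' hi => h i' (by simp [hi]))]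
    simp [gtcAlphabet]; ring

-- if the input's character list is not a valid [a,b,c] over ABCD, no guess matches
lemma gtc_invalid (tc : String)
    (h : ∀ a ∈ gtcAlphabet, ∀ b ∈ gtcAlphabet, ∀ c ∈ gtcAlphabet, tc.toList ≠ [a, b, c]) :
    guess_the_code tc = -1 := by
  unfold guess_the_code
  rw [gtcLoopI_none tc 0 gtcAlphabet]
  intro i hi j hj k hk heq
  exact h i hi j hj k hk (by rw [← heq]; simp)

lemma gtcIdx_none (c : Char) (h : c ∉ (['A', 'B', 'C', 'D'] : List Char)) :
    gtcIdx c = none := by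
  simp [gtcIdx, List.idxOf?_eq_none_iff, h]

lemma gtc_alt_invalid (tc : String)
    (h : ∀ a ∈ gtcAlphabet, ∀ b ∈ gtcAlphabet, ∀ c ∈ gtcAlphabet, tc.toList ≠ [a, b, c]) :
    guess_the_code_alt tc = -1 := by
  unfold guess_the_code_alt
  match hl : tc.toList with
  | [] => rfl
  | [_] => rfl
  | [_, _] => rfl
  | _ :: _ :: _ :: _ :: _ => rfl
  | [a, b, c] =>
    dsimp only
    by_cases ha : a ∈ gtcAlphabet
    · by_cases hb : b ∈ gtcAlphabet
      · by_cases hc : c ∈ gtcAlphabet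
        · exact absurd hl (h a ha b hb c hc)
        · rw [gtcIdx_none c (by simpa [gtcAlphabet] using hc)]
          cases gtcIdx a <;> cases gtcIdx b <;> rfl
      · rw [gtcIdx_none b (by simpa [gtcAlphabet] using hb)]
        cases gtcIdx a <;> rfl
    · rw [gtcIdx_none a (by simpa [gtcAlphabet] using ha)]

-- on a valid three-letter code both programs agree (64 concrete cases)
lemma gtc_valid (a b c : Char) (ha : a ∈ gtcAlphabet) (hb : b ∈ gtcAlphabet)
    (hc : c ∈ gtcAlphabet) :
    guess_the_code (String.ofList [a, b, c]) = guess_the_code_alt (String.ofList [a, b, c]) := by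
  fin_cases ha <;> fin_cases hb <;> fin_cases hc <;> decide

-- ===== VERDICT (by name: the statement is the Claim_ definition above) =====
theorem guess_the_code_spec : Claim_equal_guess_the_code := by
  intro tc _
  unfold Spec_guess_the_code
  by_cases h : ∀ a ∈ gtcAlphabet, ∀ b ∈ gtcAlphabet, ∀ c ∈ gtcAlphabet, tc.toList ≠ [a, b, c]
  · rw [gtc_invalid tc h, gtc_alt_invalid tc h]
  · push_neg at h
    obtain ⟨a, ha, b, hb, c, hc, hl⟩ := h
    have htc : tc = String.ofList [a, b, c] := by
      rw [← hl, String.ofList_toList]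
    rw [htc]
    exact gtc_valid a b c ha hb hc
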